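-- pv_equiv track=rewrite | github.com/sujiny-tech/k-digital-training-AI-dev | Data structure & Algorithm/Programmers-algorithm-problem/lv1_세 소수의 합.py | solution
-- ===== SOURCE A (Python) =====
-- def solution(n):
--     check=[False]+[True]*(n-1)
--     primes=[]
--
--     #에라토스테네스의 체
--     #n의 최대 약수는 sqrt(n)...
--     for i in range(2, n):
--         #False 처리 안되있으면 소수
--         if check[i]:
--             primes.append(i)
--             #소수의 배수는 합성수니까 fasle로 처리
--             for j in range(2*i, n, i):
--                 check[j]=False
--
--     #이 부분 solution 1. 안겹치게 for문 돌리기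
--     ans=0
--
--     for i in range(len(primes)-2):
--         for j in range(i+1, len(primes)-1):
--             for k in range(j+1, len(primes)):
--                 if primes[i]+primes[j]+primes[k]:
--                     ans+=1
--     return ans
-- ===== SOURCE B (Python) =====
-- def solution(n):
--     # Count primes below n by trial division, then the answer is the closed
--     # form C(m, 3) of the prime count: A's triple-loop condition primes[i]+primes[j]+primes[k]
--     # (truthiness) is always true since primes are positive, so A just counts
--     # all index triples i < j < k among its m sieved primes.
--     m = 0
--     for k in range(2, n):
--         if all(k % d for d in range(2, k)):
--             m += 1
--     return m * (m - 1) * (m - 2) // 6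
-- ===== Notes on version B (the rewrite author's own statement) =====
-- stated objective: faster
-- what changed: A's Eratosthenes sieve plus O(m^3) triple loop over the primes list (whose condition is always true, since primes are positive) is replaced by a trial-division prime count and the closed-form binomial coefficient C(m,3); no boolean array, no primes list, no nested triple loop.
import Mathlib
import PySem

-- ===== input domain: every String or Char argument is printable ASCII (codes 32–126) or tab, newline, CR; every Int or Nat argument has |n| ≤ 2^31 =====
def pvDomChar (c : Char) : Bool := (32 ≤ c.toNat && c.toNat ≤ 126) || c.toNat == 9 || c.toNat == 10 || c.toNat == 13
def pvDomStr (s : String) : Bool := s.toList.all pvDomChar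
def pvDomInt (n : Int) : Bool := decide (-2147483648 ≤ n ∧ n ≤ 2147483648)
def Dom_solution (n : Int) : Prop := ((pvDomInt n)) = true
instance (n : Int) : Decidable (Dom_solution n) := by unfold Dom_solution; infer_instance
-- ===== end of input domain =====

-- B replaces A's sieve + O(m^3) triple counting loop by a trial-division prime
-- count and the closed-form binomial coefficient C(m,3) (A's loop condition is
-- always true since primes are positive).

-- ===== PORT A =====
-- A's Eratosthenes sieve stage.  In the Python, check[i] reads and check[j]
-- writes always have 2 ≤ i, j < n = len(check), so pyGetD (default never used)
-- and List.set (index never clamped / out of range) are exact here.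
def pvSieveStep (n : Int) (st : List Bool × List Int) (i : Int) : List Bool × List Int :=
  if PySem.List.pyGetD st.1 i false then
    ((PySem.List.pyRange (2*i) n i).foldl (fun c j => c.set j.toNat false) st.1,
     st.2 ++ [i])
  else st

def pvSievePrimes (n : Int) : List Int :=
  ((PySem.List.pyRange 2 n 1).foldl (pvSieveStep n)
    ([false] ++ List.replicate (n-1).toNat true, [])).2

def solution (n : Int) : Int :=
  let primes := pvSievePrimes n
  let L : Int := primes.length
  (PySem.List.pyRange 0 (L-2) 1).foldl (fun ans i =>
    (PySem.List.pyRange (i+1) (L-1) 1).foldl (fun ans j =>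
      (PySem.List.pyRange (j+1) L 1).foldl (fun ans k =>
        if PySem.List.pyGetD primes i 0 + PySem.List.pyGetD primes j 0
             + PySem.List.pyGetD primes k 0 ≠ 0 then ans + 1 else ans) ans) ans) 0

-- ===== PORT B =====
def solution_alt (n : Int) : Int :=
  let m : Int := (PySem.List.pyRange 2 n 1).foldl
    (fun m k => if (PySem.List.pyRange 2 k 1).all (fun d => PySem.Int.mod k d != 0)
                then m + 1 else m) 0
  PySem.Int.floordiv (m * (m - 1) * (m - 2)) 6

-- ===== PRECONDITION & SPEC =====
def Spec_solution (n : Int) (out : Int) : Prop := out = solution_alt n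
instance (n : Int) (out : Int) : Decidable (Spec_solution n out) := by unfold Spec_solution; infer_instance

-- ===== CLAIM (what is proved, stated in full; the proofs are below) =====
def Claim_equal_solution : Prop := ∀ (n : Int), Dom_solution n → Spec_solution n (solution n)

-- ===== LEMMAS AND PROOFS =====

-- B's trial-division test decides primality (for 2 ≤ k)
lemma pvIsPrimeTD_iff (k : Int) (h2 : 2 ≤ k) :
    (PySem.List.pyRange 2 k 1).all (fun d => PySem.Int.mod k d != 0) = true
      ↔ Nat.Prime k.toNat := by
  rw [List.all_eq_true]
  constructor
  · intro h
    rw [Nat.prime_def_lt]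
    refine ⟨by omega, fun m hm hdvd => ?_⟩
    by_contra hne
    have hm0 : m ≠ 0 := by rintro rfl; simp at hdvd; omega
    have hm2 : 2 ≤ m := by omega
    have hmem : (m : Int) ∈ PySem.List.pyRange 2 k 1 := by
      rw [PySem.List.mem_pyRange_one]; omega
    have := h _ hmem
    simp only [bne_iff_ne, ne_eq] at this
    apply this
    rw [PySem.Int.mod_eq_zero_iff_dvd]
    have : (m : Int) ∣ (k.toNat : Int) := Int.natCast_dvd_natCast.mpr hdvd
    rwa [Int.toNat_of_nonneg (by omega)] at this
  · intro hp d hd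
    obtain ⟨hd2, hdk⟩ := PySem.List.mem_pyRange_one.mp hd
    simp only [bne_iff_ne, ne_eq]
    intro hmod
    rw [PySem.Int.mod_eq_zero_iff_dvd] at hmod
    have hdvd : d.toNat ∣ k.toNat := by
      have : ((d.toNat : Int)) ∣ ((k.toNat : Int)) := by
        rwa [Int.toNat_of_nonneg (by omega), Int.toNat_of_nonneg (by omega)]
      exact_mod_cast this
    rcases (Nat.Prime.eq_one_or_self_of_dvd hp _ hdvd) with h1 | h1 <;> omega

-- setting an out-of-range or in-range index to false, read back with getD
lemma pvSet_getD (c : List Bool) (a x : Nat) :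
    (c.set a false).getD x false = (if x = a then false else c.getD x false) := by
  by_cases hxa : x = a
  · subst hxa
    by_cases hlt : x < c.length
    · simp [List.getD_eq_getElem?_getD, hlt]
    · simp [List.getD_eq_getElem?_getD,
        List.getElem?_eq_none (l := c.set x false) (by simpa using hlt)]
  · by_cases hlt : x < c.length
    · simp [List.getD_eq_getElem?_getD, hxa, Ne.symm hxa]
    · simp [List.getD_eq_getElem?_getD, List.getElem?_eq_none (by simpa using hlt),
        List.getElem?_eq_none (l := c.set a false) (by simpa using hlt), hxa]

lemma pvMark_length (l : List Int) : ∀ c : List Bool,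
    (l.foldl (fun c j => c.set j.toNat false) c).length = c.length := by
  induction l with
  | nil => intro c; rfl
  | cons j tl ih => intro c; rw [List.foldl_cons, ih]; simp

lemma pvMark_getD (l : List Int) : ∀ (c : List Bool) (x : Nat),
    (l.foldl (fun c j => c.set j.toNat false) c).getD x false
      = (if ∃ j ∈ l, j.toNat = x then false else c.getD x false) := by
  induction l with
  | nil => intro c x; simp
  | cons a tl ih =>
    intro c x
    rw [List.foldl_cons, ih, pvSet_getD]
    by_cases h1 : ∃ j ∈ tl, j.toNat = x
    · simp [h1]
    · by_cases h2 : x = a.toNat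
      · simp [h2]
      · have : ¬ ∃ j ∈ a :: tl, j.toNat = x := by
          rintro ⟨j, hj, rfl⟩
          rcases List.mem_cons.mp hj with rfl | hj'
          · exact h2 rfl
          · exact h1 ⟨j, hj', rfl⟩
        simp only [h1, if_false, h2, if_false, this, if_false]
  
-- the sieve invariant: after processing i' ∈ [2, i), check[x] is true iff
-- x ≥ 1 and no prime < i properly divides x; primes collected so far are
-- exactly the primes of [2, i)
def pvInv (n i : Int) (st : List Bool × List Int) : Prop :=
  st.1.length = n.toNat ∧
  (∀ x : Nat, x < n.toNat →
      (st.1.getD x false = true ↔ 1 ≤ x ∧ ∀ p : Nat, p.Prime → (p : Int) < i → ¬(p ∣ x ∧ p < x))) ∧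
  st.2 = (PySem.List.pyRange 2 i 1).filter (fun k => decide (Nat.Prime k.toNat))

lemma pvStep_inv (n i : Int) (st : List Bool × List Int)
    (h2 : 2 ≤ i) (hin : i < n) (hinv : pvInv n i st) :
    pvInv n (i+1) (pvSieveStep n st i) := by
  obtain ⟨hlen, hch, hpr⟩ := hinv
  have hitn : ((i.toNat : Int)) = i := Int.toNat_of_nonneg (by omega)
  have hixlt : i.toNat < n.toNat := by omega
  have hgetd : PySem.List.pyGetD st.1 i false = st.1.getD i.toNat false := by
    rw [PySem.List.pyGetD_eq_getElem st.1 false (by omega) (by rw [hlen]; exact_mod_cast (by omega : i < (n.toNat : Int)))]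
    rw [List.getD_eq_getElem?_getD, List.getElem?_eq_getElem (by omega)]
    rfl
  have hiff : st.1.getD i.toNat false = true ↔ Nat.Prime i.toNat := by
    rw [hch i.toNat hixlt]
    constructor
    · rintro ⟨-, hall⟩
      by_contra hnp
      have hmf := Nat.minFac_prime (by omega : i.toNat ≠ 1)
      have hdvd := Nat.minFac_dvd i.toNat
      have hne : i.toNat.minFac ≠ i.toNat := by
        intro he
        exact hnp (((Nat.prime_def_minFac).mpr ⟨by omega, he⟩))
      have hlt : i.toNat.minFac < i.toNat :=
        lt_of_le_of_ne (Nat.le_of_dvd (by omega) hdvd) hne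
      exact hall i.toNat.minFac hmf (by omega) ⟨hdvd, hlt⟩
    · intro hp
      refine ⟨by omega, fun p hpp hplt ⟨hpd, hplt2⟩ => ?_⟩
      rcases Nat.Prime.eq_one_or_self_of_dvd hp p hpd with h1 | h1
      · exact Nat.Prime.one_lt hpp |>.ne' h1
      · omega
  unfold pvSieveStep
  rw [hgetd]
  by_cases hpr2 : st.1.getD i.toNat false = true
  · -- i is prime: mark multiples, append i
    have hprime : Nat.Prime i.toNat := hiff.mp hpr2
    rw [if_pos (by rw [hpr2])]
    refine ⟨by rw [pvMark_length]; exact hlen, ?_, ?_⟩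
    · intro x hx
      rw [pvMark_getD]
      have hC : (∃ j ∈ PySem.List.pyRange (2*i) n i, j.toNat = x)
          ↔ (2*i ≤ (x : Int) ∧ i ∣ (x : Int)) := by
        constructor
        · rintro ⟨j, hj, rfl⟩
          obtain ⟨hj1, hj2, hj3⟩ := (PySem.List.mem_pyRange_iff_of_pos (by omega) j).mp hj
          rw [Int.toNat_of_nonneg (by omega)]
          refine ⟨hj1, ?_⟩
          have h4 : i ∣ (j - 2*i) + 2*i := dvd_add hj3 (dvd_mul_left i 2)
          simpa using h4
        · rintro ⟨hx1, hx2⟩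
          refine ⟨(x : Int), ?_, by simp⟩
          rw [PySem.List.mem_pyRange_iff_of_pos (by omega)]
          refine ⟨hx1, by omega, ?_⟩
          have : i ∣ (x : Int) - 2*i := by
            obtain ⟨c, hc⟩ := hx2
            exact ⟨c - 2, by linarith [hc, mul_sub i c 2]⟩
          exact this
      by_cases hCx : 2*i ≤ (x : Int) ∧ i ∣ (x : Int)
      · rw [if_pos (hC.mpr hCx)]
        simp only [Bool.false_eq_true, false_iff]
        rintro ⟨hx1, hall⟩
        refine hall i.toNat hprime (by omega) ⟨?_, by omega⟩
        obtain ⟨hx2, hx3⟩ := hCx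
        have : ((i.toNat : Int)) ∣ ((x : Int)) := by rw [hitn]; exact hx3
        exact_mod_cast this
      · rw [if_neg (fun h => hCx (hC.mp h)), hch x hx]
        constructor
        · rintro ⟨hx1, hall⟩
          refine ⟨hx1, fun p hpp hplt hpc => ?_⟩
          by_cases hpi : (p : Int) < i
          · exact hall p hpp hpi hpc
          · have hpe : (p : Int) = i := by omega
            obtain ⟨hpd, hplt2⟩ := hpc
            apply hCx
            have h2p : 2 * p ≤ x := by
              obtain ⟨c, hc⟩ := hpd
              have hc2 : 2 ≤ c := by
                rcases Nat.lt_or_ge c 2 with h | h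
                · interval_cases c <;> omega
                · exact h
              calc 2 * p ≤ p * c := by nlinarith
                _ = x := hc.symm
            constructor
            · omega
            · rw [← hpe]
              exact_mod_cast hpd
        · rintro ⟨hx1, hall⟩
          exact ⟨hx1, fun p hpp hplt => hall p hpp (by omega)⟩
    · rw [PySem.List.pyRange_one_succ_right (by omega), List.filter_append, hpr]
      simp [hprime]
  · -- i is composite: state unchanged
    rw [if_neg (by simpa using hpr2)]
    have hnp : ¬ Nat.Prime i.toNat := fun h => hpr2 (hiff.mpr h)
    refine ⟨hlen, ?_, ?_⟩
    · intro x hx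
      rw [hch x hx]
      constructor
      · rintro ⟨hx1, hall⟩
        refine ⟨hx1, fun p hpp hplt => ?_⟩
        by_cases hpi : (p : Int) < i
        · exact hall p hpp hpi
        · have : p = i.toNat := by omega
          subst this
          exact absurd hpp hnp
      · rintro ⟨hx1, hall⟩
        exact ⟨hx1, fun p hpp hplt => hall p hpp (by omega)⟩
    · rw [PySem.List.pyRange_one_succ_right (by omega), List.filter_append, hpr]
      simp [hnp]

lemma pvFold_inv (n : Int) : ∀ (t : Nat) (i : Int), 2 ≤ i → i ≤ n → (n - i).toNat = t →
    ∀ st, pvInv n i st → pvInv n n ((PySem.List.pyRange i n 1).foldl (pvSieveStep n) st) := by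
  intro t
  induction t with
  | zero =>
    intro i h2 hle ht st hinv
    have : i = n := by omega
    subst this
    rw [PySem.List.pyRange_one_eq_nil le_rfl]
    exact hinv
  | succ t ih =>
    intro i h2 hle ht st hinv
    have hlt : i < n := by omega
    rw [PySem.List.pyRange_one_cons hlt, List.foldl_cons]
    exact ih (i+1) (by omega) (by omega) (by omega) _ (pvStep_inv n i st h2 hlt hinv)

-- the sieve collects exactly the primes below n
lemma pvSievePrimes_eq (n : Int) :
    pvSievePrimes n = (PySem.List.pyRange 2 n 1).filter (fun k => decide (Nat.Prime k.toNat)) := by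
  by_cases h2 : 2 ≤ n
  · have hinit : pvInv n 2 ([false] ++ List.replicate (n-1).toNat true, []) := by
      refine ⟨by simp; omega, ?_, by rw [PySem.List.pyRange_one_eq_nil le_rfl]; rfl⟩
      intro x hx
      have hx1 : ((List.replicate (n-1).toNat true : List Bool)).length = (n-1).toNat := by simp
      constructor
      · intro hgx
        refine ⟨?_, fun p hpp hplt => absurd hplt (by have := hpp.two_le; omega)⟩
        by_contra hx0
        have : x = 0 := by omega
        subst this
        simp [List.getD_eq_getElem?_getD] at hgx
      · rintro ⟨hx1', -⟩
        have hs : ([false] : List Bool).length = 1 := rfl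
        rw [List.getD_eq_getElem?_getD, List.getElem?_append_right (by rw [hs]; omega)]
        rw [hs, List.getElem?_replicate]
        rw [if_pos (by omega)]
        rfl
    have := pvFold_inv n (n - 2).toNat 2 le_rfl h2 rfl _ hinit
    exact this.2.2
  · unfold pvSievePrimes
    rw [PySem.List.pyRange_one_eq_nil (by omega)]
    rfl

-- every sieved prime is positive
lemma pvPrimes_pos (n : Int) : ∀ p ∈ pvSievePrimes n, 0 < p := by
  intro p hp
  rw [pvSievePrimes_eq] at hp
  have := List.mem_of_mem_filter hp
  have := PySem.List.mem_pyRange_one.mp this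
  omega

-- inner triangular sum: Σ_{j ∈ [a, L-1)} (L-(j+1)) doubled
lemma pvInnerSum (L : Int) : ∀ (t : Nat) (a : Int), (L - 1 - a).toNat = t →
    (((PySem.List.pyRange a (L-1) 1).map (fun j => ((L-(j+1)).toNat : Int))).sum) * 2
      = if a ≤ L-1 then (L-1-a)*(L-a) else 0 := by
  intro t
  induction t with
  | zero =>
    intro a ha
    rw [PySem.List.pyRange_one_eq_nil (by omega)]
    split_ifs with h
    · have h0 : L - 1 - a = 0 := by omega
      simp [h0]
    · simp
  | succ t ih =>
    intro a ha
    rw [PySem.List.pyRange_one_cons (by omega : a < L-1)]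
    simp only [List.map_cons, List.sum_cons]
    have hrest := ih (a+1) (by omega)
    rw [if_pos (by omega)] at hrest
    have hcast : ((L-(a+1)).toNat : Int) = L - a - 1 := by omega
    rw [if_pos (by omega), hcast]
    linear_combination hrest

-- outer sum of the triangular sums, sextupled
lemma pvOuterSum (L : Int) : ∀ (t : Nat) (a : Int), (L - 2 - a).toNat = t →
    (((PySem.List.pyRange a (L-2) 1).map (fun i =>
        ((PySem.List.pyRange (i+1) (L-1) 1).map (fun j => ((L-(j+1)).toNat : Int))).sum)).sum) * 6
      = if a ≤ L-2 then (L-2-a)*(L-1-a)*(L-a) else 0 := by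
  intro t
  induction t with
  | zero =>
    intro a ha
    rw [PySem.List.pyRange_one_eq_nil (by omega)]
    split_ifs with h
    · have h0 : L - 2 - a = 0 := by omega
      simp [h0]
    · simp
  | succ t ih =>
    intro a ha
    rw [PySem.List.pyRange_one_cons (by omega : a < L-2)]
    simp only [List.map_cons, List.sum_cons]
    have hrest := ih (a+1) (by omega)
    rw [if_pos (by omega)] at hrest
    have hhead := pvInnerSum L (L-1-(a+1)).toNat (a+1) rfl
    rw [if_pos (by omega)] at hhead
    rw [if_pos (by omega)]
    linear_combination 3 * hhead + hrest

-- B's loop counts exactly the sieved primes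
lemma pvCount_eq (n : Int) :
    (PySem.List.pyRange 2 n 1).foldl
      (fun m k => if (PySem.List.pyRange 2 k 1).all (fun d => PySem.Int.mod k d != 0)
                  then m + 1 else m) 0
      = ((pvSievePrimes n).length : Int) := by
  rw [PySem.List.foldl_if_add_one, List.countP_eq_length_filter, pvSievePrimes_eq]
  have hcong : (PySem.List.pyRange 2 n 1).filter
      (fun k => (PySem.List.pyRange 2 k 1).all (fun d => PySem.Int.mod k d != 0))
      = (PySem.List.pyRange 2 n 1).filter (fun k => decide (Nat.Prime k.toNat)) := by
    apply List.filter_congr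
    intro k hk
    have h2 := (PySem.List.mem_pyRange_one.mp hk).1
    by_cases hp : Nat.Prime k.toNat
    · simp [hp, (pvIsPrimeTD_iff k h2).mpr hp]
    · simp only [hp, decide_false]
      by_contra hall
      exact hp ((pvIsPrimeTD_iff k h2).mp (by simpa using hall))
  rw [hcong]
  simp

-- ===== VERDICT (by name: the statement is the Claim_ definition above) =====
theorem solution_spec : Claim_equal_solution := by
  intro n _
  unfold Spec_solution solution solution_alt
  rw [pvCount_eq]
  set primes := pvSievePrimes n with hprimes
  simp only []
  set L : Int := (primes.length : Int) with hL
  have hLnn : 0 ≤ L := by positivity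
  -- step 1: the innermost condition is always true on the visited indices
  have hget : ∀ (i : Int), 0 ≤ i → i < L → 0 < PySem.List.pyGetD primes i 0 := by
    intro i h0 h1
    rw [PySem.List.pyGetD_eq_getElem primes 0 h0 (by simpa using h1)]
    exact pvPrimes_pos n _ (List.getElem_mem _)
  -- step 2: collapse the triple loop into nested sums
  have hloop :
      (PySem.List.pyRange 0 (L-2) 1).foldl (fun ans i =>
        (PySem.List.pyRange (i+1) (L-1) 1).foldl (fun ans j =>
          (PySem.List.pyRange (j+1) L 1).foldl (fun ans k =>
            if PySem.List.pyGetD primes i 0 + PySem.List.pyGetD primes j 0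
                 + PySem.List.pyGetD primes k 0 ≠ 0 then ans + 1 else ans) ans) ans) 0
      = (((PySem.List.pyRange 0 (L-2) 1).map (fun i =>
            ((PySem.List.pyRange (i+1) (L-1) 1).map (fun j => ((L-(j+1)).toNat : Int))).sum)).sum) := by
    rw [PySem.List.foldl_congr_mem'
      (g := fun ans i => ans + ((PySem.List.pyRange (i+1) (L-1) 1).map
              (fun j => ((L-(j+1)).toNat : Int))).sum)]
    · rw [PySem.List.foldl_add]; simp
    · intro i hi acc
      obtain ⟨hi0, hi1⟩ := PySem.List.mem_pyRange_one.mp hi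
      rw [PySem.List.foldl_congr_mem' (g := fun ans j => ans + ((L-(j+1)).toNat : Int))]
      · rw [PySem.List.foldl_add]
      · intro j hj acc2
        obtain ⟨hj0, hj1⟩ := PySem.List.mem_pyRange_one.mp hj
        rw [PySem.List.foldl_congr_mem' (g := fun ans k => ans + 1)]
        · rw [PySem.List.foldl_add]
          simp [PySem.List.length_pyRange_one]
        · intro k hk acc3
          obtain ⟨hk0, hk1⟩ := PySem.List.mem_pyRange_one.mp hk
          rw [if_pos]
          have h1 := hget i hi0 (by omega)
          have h2 := hget j (by omega) (by omega)
          have h3 := hget k (by omega) (by omega)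
          omega
  rw [hloop]
  -- step 3: the closed form
  have hsum := pvOuterSum L (L-2-0).toNat 0 rfl
  by_cases h2 : 2 ≤ L
  · rw [if_pos (by omega)] at hsum
    have hprod : L * (L - 1) * (L - 2) =
        (((PySem.List.pyRange 0 (L-2) 1).map (fun i =>
            ((PySem.List.pyRange (i+1) (L-1) 1).map (fun j => ((L-(j+1)).toNat : Int))).sum)).sum) * 6 := by
      linear_combination -hsum
    rw [hprod, mul_comm, PySem.Int.floordiv_eq_ediv_of_pos (by norm_num),
      Int.mul_ediv_cancel_left _ (by norm_num)]
  · rw [if_neg (by omega)] at hsum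
    have hz : (((PySem.List.pyRange 0 (L-2) 1).map (fun i =>
        ((PySem.List.pyRange (i+1) (L-1) 1).map (fun j => ((L-(j+1)).toNat : Int))).sum)).sum) = 0 := by
      omega
    rw [hz]
    have : L = 0 ∨ L = 1 := by omega
    rcases this with h | h <;> rw [h] <;> decide
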